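-- pv_equiv track=rewrite | github.com/ruben-tsui/bicon | biconWebStm.py | buildLexicon
-- ===== SOURCE A (Python) =====
-- def buildLexicon(matched_tokens, alignment, e, z):
--     '''
--     (1, 3), (1,4), (1, 5) becomes {e[1]: {' '.join([z[3], z[4], z[5]]): 1}}
--     '''
--     alignment = sorted(alignment)
--     L = dict()
--     for (i, j) in alignment:
--         if e[i] in matched_tokens:
--             s = e[i]; t = z[j]
--             if s not in L:
--                 L[s] = [t]
--             else:
--                 L[s].append(t)
--     for k in L:
--         v = ' '.join(L[k])
--         L[k] = {v: 1}
--
--     return L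
-- ===== SOURCE B (Python) =====
-- def buildLexicon(matched_tokens, alignment, e, z):
--     # Group extraction: repeatedly peel off the first source token's whole
--     # group from the sorted pair list (no dict-of-lists accumulation, no
--     # second rewrite loop); groups come out in first-occurrence order.
--     ps = sorted(alignment)
--     out = []
--     while ps:
--         s = e[ps[0][0]]
--         if s in matched_tokens:
--             out.append((s, {' '.join(z[j] for i, j in ps if e[i] == s): 1}))
--         ps = [p for p in ps if e[p[0]] != s]
--     return dict(out)
-- ===== Notes on version B (the rewrite author's own statement) =====
-- stated objective: alternative
-- what changed: Replaces A's dict-of-lists accumulation plus a second rewrite loop by a group-extraction loop: repeatedly peel the first source token's whole group off the sorted pair list and emit it directly, so no dict is built and no rewrite pass runs.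
-- outside the precondition, e.g. on buildLexicon(['a'], [(5, 0)], ['a'], ['x']): A raises IndexError, B raises IndexError
import Mathlib
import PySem

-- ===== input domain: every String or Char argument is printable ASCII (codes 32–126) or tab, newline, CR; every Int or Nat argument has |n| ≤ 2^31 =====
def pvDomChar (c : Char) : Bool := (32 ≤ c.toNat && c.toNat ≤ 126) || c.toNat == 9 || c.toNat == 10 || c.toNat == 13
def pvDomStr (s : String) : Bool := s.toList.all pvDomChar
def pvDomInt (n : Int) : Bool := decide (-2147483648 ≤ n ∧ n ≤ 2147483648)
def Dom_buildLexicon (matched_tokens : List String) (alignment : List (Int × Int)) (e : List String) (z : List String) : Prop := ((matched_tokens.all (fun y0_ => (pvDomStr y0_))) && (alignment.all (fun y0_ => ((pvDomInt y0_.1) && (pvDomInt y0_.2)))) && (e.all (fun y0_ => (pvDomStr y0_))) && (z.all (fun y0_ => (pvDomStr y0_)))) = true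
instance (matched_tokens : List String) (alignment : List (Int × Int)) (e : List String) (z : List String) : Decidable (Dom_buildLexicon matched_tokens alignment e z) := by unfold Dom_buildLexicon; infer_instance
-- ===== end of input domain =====

-- B replaces A's dict-of-lists accumulation + rewrite loop by repeated extraction of the
-- first source token's whole group from the sorted pair list (alternative decomposition).


-- ===== PORT A =====
def buildLexicon (matched_tokens : List String) (alignment : List (Int × Int)) (e : List String) (z : List String) : List (String × List (String × Int)) :=
  -- alignment = sorted(alignment)  (lexicographic tuple order)
  let alignment := PySem.List.sorted2 alignment (fun p => p.1) (fun p => p.2) false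
  -- first loop: accumulate a dict of token lists
  let L : PySem.Dict String (List String) :=
    alignment.foldl (fun L p =>
      let s := PySem.List.pyGetD e p.1 ""
      if s ∈ matched_tokens then
        let t := PySem.List.pyGetD z p.2 ""
        if L.contains s = false then L.insert s [t]
        else L.modify s [] (fun v => v ++ [t])   -- L[s].append(t)
      else L) PySem.Dict.empty
  -- second loop: for k in L: L[k] = {' '.join(L[k]): 1}
  L.items.map (fun kv => (kv.1, [(PySem.Str.join " " kv.2, (1 : Int))]))

-- ===== PORT B =====
-- the while loop: peel off the first source token's whole group, then drop it from ps
def pvGroups (matched_tokens : List String) (e : List String) (z : List String) : List (Int × Int) → List (String × List (String × Int))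
  | [] => []
  | p :: ps =>
    let s := PySem.List.pyGetD e p.1 ""
    -- ps = [p for p in ps if e[p[0]] != s]
    let rest := (p :: ps).filter (fun q => PySem.List.pyGetD e q.1 "" != s)
    if s ∈ matched_tokens then
      -- out.append((s, {' '.join(z[j] for i, j in ps if e[i] == s): 1}))
      (s, [(PySem.Str.join " " (((p :: ps).filter (fun q => PySem.List.pyGetD e q.1 "" == s)).map (fun q => PySem.List.pyGetD z q.2 "")), (1 : Int))])
        :: pvGroups matched_tokens e z rest
    else pvGroups matched_tokens e z rest
termination_by l => l.length
decreasing_by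
  all_goals
    simp only [List.filter_cons, bne_self_eq_false, Bool.false_eq_true, if_false, List.length_cons]
    exact Nat.lt_succ_of_le (List.length_filter_le _ _)

def buildLexicon_alt (matched_tokens : List String) (alignment : List (Int × Int)) (e : List String) (z : List String) : List (String × List (String × Int)) :=
  -- dict(out): the extracted keys are pairwise distinct, so dict(out) is the list out itself
  pvGroups matched_tokens e z (PySem.List.sorted2 alignment (fun p => p.1) (fun p => p.2) false)

-- ===== PRECONDITION & SPEC =====
-- Pre_ excludes exactly the inputs where Python A raises IndexError: some (i, j) in
-- alignment has i out of range for e, or e[i] matched and j out of range for z.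
def Pre_buildLexicon (matched_tokens : List String) (alignment : List (Int × Int)) (e : List String) (z : List String) : Prop :=
  ∀ p ∈ alignment, PySem.Raise.InRange e.length p.1 ∧
    (PySem.List.pyGetD e p.1 "" ∈ matched_tokens → PySem.Raise.InRange z.length p.2)
instance (matched_tokens : List String) (alignment : List (Int × Int)) (e : List String) (z : List String) : Decidable (Pre_buildLexicon matched_tokens alignment e z) := by unfold Pre_buildLexicon; infer_instance
def pvWitness_buildLexicon : List String × (List (Int × Int)) × List String × List String :=
  (["a"], [(0, 0), (0, 1)], ["a", "b"], ["x", "y"])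

def Spec_buildLexicon (matched_tokens : List String) (alignment : List (Int × Int)) (e : List String) (z : List String) (out : List (String × List (String × Int))) : Prop := out = buildLexicon_alt matched_tokens alignment e z
instance (matched_tokens : List String) (alignment : List (Int × Int)) (e : List String) (z : List String) (out : List (String × List (String × Int))) : Decidable (Spec_buildLexicon matched_tokens alignment e z out) := by unfold Spec_buildLexicon; infer_instance

-- ===== CLAIM (what is proved, stated in full; the proofs are below) =====
def Claim_equal_buildLexicon : Prop := ∀ (matched_tokens : List String) (alignment : List (Int × Int)) (e : List String) (z : List String), Dom_buildLexicon matched_tokens alignment e z → Pre_buildLexicon matched_tokens alignment e z → Spec_buildLexicon matched_tokens alignment e z (buildLexicon matched_tokens alignment e z)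

-- ===== LEMMAS AND PROOFS =====

-- the filtered (source token, target token) pair list both results are determined by
def pvMkPairs (matched_tokens : List String) (e : List String) (z : List String) (l : List (Int × Int)) : List (String × String) :=
  l.filterMap (fun p =>
    let s := PySem.List.pyGetD e p.1 ""
    if s ∈ matched_tokens then some (s, PySem.List.pyGetD z p.2 "") else none)

-- the common normal form: distinct keys in first-occurrence order, each with its joined group
def pvF (pairs : List (String × String)) : List (String × List (String × Int)) :=
  (PySem.List.dedup (pairs.map Prod.fst)).map (fun s =>
    (s, [(PySem.Str.join " " ((pairs.filter (fun q => q.1 == s)).map Prod.snd), (1 : Int))]))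

-- A's accumulation loop is the modify-append fold over the filtered pair list
lemma pvFoldA_eq (matched_tokens : List String) (e : List String) (z : List String) :
    ∀ (l : List (Int × Int)) (d : PySem.Dict String (List String)),
      l.foldl (fun L p =>
        let s := PySem.List.pyGetD e p.1 ""
        if s ∈ matched_tokens then
          let t := PySem.List.pyGetD z p.2 ""
          if L.contains s = false then L.insert s [t]
          else L.modify s [] (fun v => v ++ [t])
        else L) d
      = (pvMkPairs matched_tokens e z l).foldl (fun d q => d.modify q.1 [] (fun v => v ++ [q.2])) d := by
  intro l
  induction l with
  | nil => intro d; simp [pvMkPairs]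
  | cons p l ih =>
    intro d
    simp only [List.foldl_cons, pvMkPairs, List.filterMap_cons]
    by_cases hs : PySem.List.pyGetD e p.1 "" ∈ matched_tokens
    · simp only [hs, if_pos]
      by_cases hc : d.contains (PySem.List.pyGetD e p.1 "") = false
      · have : d.insert (PySem.List.pyGetD e p.1 "") [PySem.List.pyGetD z p.2 ""]
            = d.modify (PySem.List.pyGetD e p.1 "") [] (fun v => v ++ [PySem.List.pyGetD z p.2 ""]) := by
          simp [PySem.Dict.modify, PySem.Dict.getD_of_not_contains _ _ hc]
        simpa [hc, this, pvMkPairs] using ih _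
      · simpa [hc, pvMkPairs] using ih _
    · simpa [hs, pvMkPairs] using ih _

-- the modify-append fold from the empty dict, read back as items
lemma pvItems_fold (pairs : List (String × String)) :
    (pairs.foldl (fun d q => d.modify q.1 [] (fun v => v ++ [q.2]))
        (PySem.Dict.empty : PySem.Dict String (List String))).items
      = (PySem.List.dedup (pairs.map (fun q => q.1))).map
          (fun s => (s, (pairs.filter (fun q => q.1 == s)).map (fun q => q.2))) := by
  have hnd : ((pairs.foldl (fun d q => d.modify q.1 [] (fun v => v ++ [q.2]))
      (PySem.Dict.empty : PySem.Dict String (List String))).keys).Nodup := by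
    exact PySem.Dict.nodup_keys_foldl_modify_key pairs (fun q => q.1) [] (fun _ q => (fun v => v ++ [q.2])) _ (by simp)
  rw [PySem.Dict.items_eq_map_keys _ hnd []]
  have hk : (pairs.foldl (fun d q => d.modify q.1 [] (fun v => v ++ [q.2]))
      (PySem.Dict.empty : PySem.Dict String (List String))).keys
      = PySem.List.dedup (pairs.map (fun q => q.1)) := by
    rw [PySem.Dict.keys_foldl_modify_key pairs (fun q => q.1) [] (fun _ q => (fun v => v ++ [q.2]))]
    simp [PySem.List.dedup_eq_ofList, PySem.Dict.keys_empty]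
    rfl
  rw [hk]
  apply List.map_congr_left
  intro s _
  rw [PySem.Dict.getD_foldl_modify_append]
  simp

-- map fst commutes with a key filter
lemma pvMapFst_filter (s : String) (P : List (String × String)) :
    (P.filter (fun q => q.1 != s)).map Prod.fst = (P.map Prod.fst).filter (fun y => y != s) := by
  rw [List.filter_map]
  rfl

-- dedup commutes with filter
lemma pvDedup_filter {α : Type} [BEq α] [LawfulBEq α] (p : α → Bool) :
    ∀ (xs : List α), (PySem.List.dedup xs).filter p = PySem.List.dedup (xs.filter p) := by
  intro xs
  induction xs with
  | nil => simp [PySem.List.dedup_eq_ofList, PySem.Set.ofList_nil]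
  | cons x xs ih =>
    simp only [PySem.List.dedup_eq_ofList] at *
    rw [PySem.Set.ofList_cons, PySem.Set.discard, List.filter_cons, List.filter_cons]
    by_cases hp : p x = true
    · simp only [hp, if_pos]
      rw [PySem.Set.ofList_cons, PySem.Set.discard, List.filter_filter, ← ih, List.filter_filter]
      congr 1
      apply List.filter_congr
      intro y _
      rw [Bool.and_comm]
    · simp only [hp, Bool.false_eq_true, if_false]
      rw [List.filter_filter, ← ih]
      apply List.filter_congr
      intro y _
      by_cases hy : p y = true
      · have hne : (!(y == x)) = true := by
          rcases eq_or_ne y x with h | h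
          · subst h; exact absurd hy (by simp [hp])
          · simpa using h
        simp [hy, hne]
      · simp [Bool.eq_false_iff.mpr hy]

-- restricting a key filter (== s') to pairs already filtered by (!= s), s' ≠ s
lemma pvFilter_restrict (s s' : String) (hne : s' ≠ s) (P : List (String × String)) :
    (P.filter (fun q => q.1 != s)).filter (fun q => q.1 == s') = P.filter (fun q => q.1 == s') := by
  rw [List.filter_filter]
  apply List.filter_congr
  intro q _
  by_cases h : (q.1 == s') = true
  · have hb : (q.1 != s) = true := by
      rw [eq_of_beq h]; simpa [bne_iff_ne] using hne
    simp [h, hb]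
  · simp [Bool.eq_false_iff.mpr h]

-- pvMkPairs commutes with dropping one source token
lemma pvMkPairs_filter (matched_tokens : List String) (e : List String) (z : List String) (s : String) :
    ∀ (l : List (Int × Int)),
      pvMkPairs matched_tokens e z (l.filter (fun q => PySem.List.pyGetD e q.1 "" != s))
        = (pvMkPairs matched_tokens e z l).filter (fun q => q.1 != s) := by
  intro l
  induction l with
  | nil => simp [pvMkPairs]
  | cons p l ih =>
    simp only [pvMkPairs, List.filter_cons, List.filterMap_cons] at *
    by_cases hm : PySem.List.pyGetD e p.1 "" ∈ matched_tokens
    · by_cases hs : (PySem.List.pyGetD e p.1 "" != s) = true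
      · simp [hm, hs, ih]
      · simp only [Bool.not_eq_true] at hs
        simp [hm, hs, ih]
    · by_cases hs : (PySem.List.pyGetD e p.1 "" != s) = true
      · simp [hm, hs, ih]
      · simp only [Bool.not_eq_true] at hs
        simp [hm, hs, ih]

-- the joined group of a matched token, read off the raw list or the pair list
lemma pvGroup_map (matched_tokens : List String) (e : List String) (z : List String) (s : String)
    (hs : s ∈ matched_tokens) :
    ∀ (l : List (Int × Int)),
      ((l.filter (fun q => PySem.List.pyGetD e q.1 "" == s)).map (fun q => PySem.List.pyGetD z q.2 ""))
        = ((pvMkPairs matched_tokens e z l).filter (fun q => q.1 == s)).map Prod.snd := by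
  intro l
  induction l with
  | nil => simp [pvMkPairs]
  | cons p l ih =>
    simp only [pvMkPairs, List.filter_cons, List.filterMap_cons] at *
    by_cases he : (PySem.List.pyGetD e p.1 "" == s) = true
    · have hm : PySem.List.pyGetD e p.1 "" ∈ matched_tokens := by
        rw [eq_of_beq he]; exact hs
      simp [he, hm, ih]
    · by_cases hm : PySem.List.pyGetD e p.1 "" ∈ matched_tokens
      · simp [he, hm, ih]
      · simp [he, hm, ih]

-- dropping an unmatched token from the pair list drops nothing
lemma pvFilter_unmatched (matched_tokens : List String) (e : List String) (z : List String) (s : String)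
    (hs : s ∉ matched_tokens) :
    ∀ (l : List (Int × Int)),
      (pvMkPairs matched_tokens e z l).filter (fun q => q.1 != s) = pvMkPairs matched_tokens e z l := by
  intro l
  induction l with
  | nil => simp [pvMkPairs]
  | cons p l ih =>
    simp only [pvMkPairs, List.filterMap_cons] at *
    by_cases hm : PySem.List.pyGetD e p.1 "" ∈ matched_tokens
    · have hne : (PySem.List.pyGetD e p.1 "" != s) = true := by
        simp only [bne_iff_ne, ne_eq]
        intro h; exact hs (h ▸ hm)
      simp [hm, hne, ih]
    · simp [hm, ih]

-- peeling the head group off pvF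
lemma pvF_cons (s t : String) (P : List (String × String)) :
    pvF ((s, t) :: P)
      = (s, [(PySem.Str.join " " ((((s, t) :: P).filter (fun q => q.1 == s)).map Prod.snd), (1 : Int))])
        :: pvF (((s, t) :: P).filter (fun q => q.1 != s)) := by
  have hdrop : ((s, t) :: P).filter (fun q => q.1 != s) = P.filter (fun q => q.1 != s) := by
    rw [List.filter_cons]; simp
  have hkeys : PySem.List.dedup (((s, t) :: P).map Prod.fst)
      = s :: PySem.List.dedup (((((s, t) :: P).filter (fun q => q.1 != s)).map Prod.fst)) := by
    rw [hdrop, pvMapFst_filter, List.map_cons]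
    rw [show (PySem.List.dedup (s :: P.map Prod.fst)) = PySem.Set.ofList (s :: P.map Prod.fst) from rfl]
    rw [PySem.Set.ofList_cons, PySem.Set.discard]
    rw [show (PySem.Set.ofList (P.map Prod.fst) : List String) = PySem.List.dedup (P.map Prod.fst) from rfl]
    rw [pvDedup_filter]
    rfl
  simp only [pvF]
  rw [hkeys, List.map_cons]
  congr 1
  apply List.map_congr_left
  intro s' hs'
  have hne : s' ≠ s := by
    have h1 := (PySem.List.mem_dedup _ _).mp hs'
    rcases List.mem_map.mp h1 with ⟨q, hq, rfl⟩
    have h2 := List.of_mem_filter hq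
    simpa [bne_iff_ne] using h2
  rw [pvFilter_restrict s s' hne]

-- B's group-extraction loop computes the normal form of the pair list
lemma pvGroups_eq (matched_tokens : List String) (e : List String) (z : List String) :
    ∀ (l : List (Int × Int)),
      pvGroups matched_tokens e z l = pvF (pvMkPairs matched_tokens e z l) := by
  intro l
  induction l using pvGroups.induct matched_tokens e with
  | case1 => simp [pvGroups, pvMkPairs, pvF, PySem.List.dedup_eq_ofList, PySem.Set.ofList_nil]
  | case2 p ps s rest hm ih =>
    have hm' : PySem.List.pyGetD e p.1 "" ∈ matched_tokens := hm
    have ih' : pvGroups matched_tokens e z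
          ((p :: ps).filter (fun q => PySem.List.pyGetD e q.1 "" != PySem.List.pyGetD e p.1 ""))
        = pvF (pvMkPairs matched_tokens e z
          ((p :: ps).filter (fun q => PySem.List.pyGetD e q.1 "" != PySem.List.pyGetD e p.1 ""))) := ih
    rw [pvGroups]
    rw [if_pos hm']
    rw [ih', pvMkPairs_filter]
    have hP : pvMkPairs matched_tokens e z (p :: ps)
        = (PySem.List.pyGetD e p.1 "", PySem.List.pyGetD z p.2 "") :: pvMkPairs matched_tokens e z ps := by
      simp [pvMkPairs, hm']
    rw [hP, pvF_cons, ← hP]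
    rw [pvGroup_map matched_tokens e z _ hm' (p :: ps)]
  | case3 p ps s rest hm ih =>
    have hm' : PySem.List.pyGetD e p.1 "" ∉ matched_tokens := hm
    have ih' : pvGroups matched_tokens e z
          ((p :: ps).filter (fun q => PySem.List.pyGetD e q.1 "" != PySem.List.pyGetD e p.1 ""))
        = pvF (pvMkPairs matched_tokens e z
          ((p :: ps).filter (fun q => PySem.List.pyGetD e q.1 "" != PySem.List.pyGetD e p.1 ""))) := ih
    rw [pvGroups]
    rw [if_neg hm']
    rw [ih', pvMkPairs_filter, pvFilter_unmatched matched_tokens e z _ hm']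

-- ===== VERDICT (by name: the statement is the Claim_ definition above) =====
theorem buildLexicon_spec : Claim_equal_buildLexicon := by
  intro matched_tokens alignment e z _ _
  simp only [Spec_buildLexicon, buildLexicon, buildLexicon_alt]
  rw [pvFoldA_eq, pvItems_fold, pvGroups_eq]
  simp only [pvF, List.map_map]
  rfl
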